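-- pv_equiv track=rewrite | github.com/codeit-bootcamp-frontend/0-study-algorithms | 프로그래머스/1/1845. 폰켓몬/폰켓몬.py | solution
-- ===== SOURCE A (Python) =====
-- def solution(nums):
--     dict = {}
--     num_pocketmon = len(nums)
--     num_kind_pocketmon = 0
--     for num in nums:
--         if num not in dict:
--             dict[num]  = True
--             num_kind_pocketmon += 1
--
--     return min(num_kind_pocketmon, num_pocketmon // 2)
-- ===== SOURCE B (Python) =====
-- def solution(nums):
--     # distinct count by sort + adjacent-difference scan (no set/dict)
--     s = sorted(nums)
--     if not s:
--         count = 0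
--     else:
--         count = 1
--         prev = s[0]
--         for v in s[1:]:
--             if v != prev:
--                 count += 1
--             prev = v
--     return min(count, len(nums) // 2)
-- ===== Notes on version B (the rewrite author's own statement) =====
-- stated objective: alternative
-- what changed: Distinct values are counted by sorting and scanning adjacent pairs instead of building a hash dict of seen keys.
import Mathlib
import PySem

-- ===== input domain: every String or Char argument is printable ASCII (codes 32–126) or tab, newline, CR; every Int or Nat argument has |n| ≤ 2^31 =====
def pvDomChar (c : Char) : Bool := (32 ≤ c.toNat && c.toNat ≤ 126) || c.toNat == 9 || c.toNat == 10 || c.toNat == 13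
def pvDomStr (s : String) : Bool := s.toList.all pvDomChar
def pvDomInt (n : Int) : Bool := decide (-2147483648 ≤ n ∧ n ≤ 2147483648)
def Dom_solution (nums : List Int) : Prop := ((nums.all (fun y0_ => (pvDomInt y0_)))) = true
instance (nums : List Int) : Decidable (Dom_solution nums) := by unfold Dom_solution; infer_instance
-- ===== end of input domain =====

-- B counts distinct values by a sorted adjacent-difference scan instead of A's seen-dict; same cost class, no hash structure (objective: alternative).

-- ===== PORT A =====
-- the for-loop of A, carrying the dict and the kind counter
def solLoop : List Int → PySem.Dict Int Bool → Int → Int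
  | [], _, k => k
  | num :: rest, d, k =>
    if d.contains num then solLoop rest d k
    else solLoop rest (d.insert num true) (k + 1)

def solution (nums : List Int) : Int :=
  min (solLoop nums PySem.Dict.empty 0) (PySem.Int.floordiv (nums.length : Int) 2)

-- ===== PORT B =====
-- the for-loop of B over the tail of the sorted list, carrying prev and the count
def altScan : Int → List Int → Int → Int
  | _, [], c => c
  | prev, v :: rest, c => altScan v rest (if v ≠ prev then c + 1 else c)

def solution_alt (nums : List Int) : Int :=
  let s := PySem.List.sorted nums (fun x => x) false
  let count : Int :=
    match s with
    | [] => 0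
    | x :: xs => altScan x xs 1
  min count (PySem.Int.floordiv (nums.length : Int) 2)

-- ===== PRECONDITION & SPEC =====
def Spec_solution (nums : List Int) (out : Int) : Prop := out = solution_alt nums
instance (nums : List Int) (out : Int) : Decidable (Spec_solution nums out) := by unfold Spec_solution; infer_instance

-- ===== CLAIM (what is proved, stated in full; the proofs are below) =====
def Claim_equal_solution : Prop := ∀ (nums : List Int), Dom_solution nums → Spec_solution nums (solution nums)

-- ===== LEMMAS AND PROOFS =====

lemma card_insert_int (a : Int) (s : Finset Int) :
    ((insert a s).card : Int) = 1 + ((s.erase a).card : Int) := by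
  have h : insert a s = insert a (s.erase a) := by
    ext x; by_cases h : x = a <;> simp [h]
  rw [h, Finset.card_insert_of_notMem (Finset.notMem_erase _ _)]
  push_cast; ring

lemma solLoop_eq (xs : List Int) : ∀ (d : PySem.Dict Int Bool) (k : Int),
    solLoop xs d k = k + ((xs.toFinset \ d.keys.toFinset).card : Int) := by
  induction xs with
  | nil => intro d k; simp [solLoop]
  | cons num rest ih =>
    intro d k
    by_cases h : d.contains num = true
    · have hm : num ∈ d.keys.toFinset := by
        simpa using (PySem.Dict.contains_iff_mem_keys d num).mp h
      simp only [solLoop, h, if_true, ih, List.toFinset_cons,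
        Finset.insert_sdiff_of_mem _ hm]
    · have hc : d.contains num = false := by simpa using h
      have hm : num ∉ d.keys.toFinset := by
        simp only [List.mem_toFinset]
        exact fun hk => h ((PySem.Dict.contains_iff_mem_keys d num).mpr hk)
      have hkeys : (d.insert num true).keys = d.keys ++ [num] :=
        PySem.Dict.keys_insert_of_not_contains d true hc
      simp only [solLoop, hc, Bool.false_eq_true, if_false, ih, List.toFinset_cons, hkeys]
      have h1 : (insert num rest.toFinset) \ d.keys.toFinset
          = insert num (rest.toFinset \ d.keys.toFinset) :=
        Finset.insert_sdiff_of_notMem _ hm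
      have h2 : rest.toFinset \ (d.keys ++ [num]).toFinset
          = (rest.toFinset \ d.keys.toFinset).erase num := by
        ext x; by_cases hx : x = num <;> simp [hx]
      rw [h1, h2, card_insert_int]; ring

lemma altScan_eq (ys : List Int) : ∀ (prev c : Int),
    (prev :: ys).Pairwise (· ≤ ·) →
    altScan prev ys c = c + ((ys.toFinset.erase prev).card : Int) := by
  induction ys with
  | nil => intro prev c _; simp [altScan]
  | cons y rest ih =>
    intro prev c hp
    rcases List.pairwise_cons.mp hp with ⟨hle, hp'⟩
    by_cases h : y = prev
    · subst h
      have hpw : (y :: rest).Pairwise (· ≤ ·) := hp'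
      simp only [altScan, ne_eq, not_true_eq_false, if_false, ih y c hp',
        List.toFinset_cons, Finset.erase_insert_eq_erase]
    · have hlt : prev < y := lt_of_le_of_ne (hle y (by simp)) (Ne.symm h)
      have hnp : prev ∉ rest.toFinset := by
        simp only [List.mem_toFinset]
        intro hmem
        exact absurd ((List.pairwise_cons.mp hp').1 prev hmem) (not_le.mpr hlt)
      have := ih y (c + 1) hp'
      simp only [altScan, ne_eq, h, not_false_eq_true, if_true, this,
        List.toFinset_cons]
      have h2 : (insert y rest.toFinset).erase prev
          = insert y (rest.toFinset.erase prev) :=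
        Finset.erase_insert_of_ne (fun hy => h hy)
      rw [h2, Finset.erase_eq_of_notMem hnp, card_insert_int]; ring

lemma solution_count_eq (nums : List Int) :
    solLoop nums PySem.Dict.empty 0
      = (match PySem.List.sorted nums (fun x => x) false with
         | [] => (0 : Int)
         | x :: xs => altScan x xs 1) := by
  have hA : solLoop nums PySem.Dict.empty 0 = ((nums.toFinset.card : Nat) : Int) := by
    rw [solLoop_eq]
    simp [PySem.Dict.keys_empty]
  rw [hA]
  have hperm : (PySem.List.sorted nums (fun x => x) false).Perm nums :=
    PySem.List.sorted_perm nums (fun x => x) false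
  have hfs : (PySem.List.sorted nums (fun x => x) false).toFinset = nums.toFinset := by
    ext z; simp [List.mem_toFinset, hperm.mem_iff]
  have hpw : (PySem.List.sorted nums (fun x => x) false).Pairwise (· ≤ ·) := by
    simpa using PySem.List.sorted_pairwise nums (fun x => x)
  cases hs : PySem.List.sorted nums (fun x => x) false with
  | nil =>
    have : nums = [] := by
      have := hperm; rw [hs] at this
      exact (List.Perm.nil_eq this).symm
    simp [this]
  | cons x xs =>
    rw [hs] at hpw hfs
    rw [show (match x :: xs with | [] => (0 : Int) | y :: ys => altScan y ys 1)
          = altScan x xs 1 from rfl]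
    rw [altScan_eq xs x 1 hpw, ← hfs, List.toFinset_cons, card_insert_int]

-- ===== VERDICT (by name: the statement is the Claim_ definition above) =====
theorem solution_spec : Claim_equal_solution := by
  intro nums _
  unfold Spec_solution solution solution_alt
  rw [solution_count_eq nums]
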